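-- pv_equiv track=rewrite | github.com/tmarktaylor/cities | cities.py | calculate_numbers_of_combinations_of
-- ===== SOURCE A (Python) =====
-- import itertools
--
-- def calculate_numbers_of_combinations_of(a_sequence):
--     """Return dict key= subsequence length, value= number of combinations)."""
--     number_of_combinations = dict()
--     for at_a_time, _ in enumerate(a_sequence, start=1):
--         n = len(a_sequence)
--         subsequences = itertools.combinations(a_sequence, at_a_time)
--
--         # This requires less memory than
--         # subsequence_length = len(list(combinations))
--         # and should run faster.
--         subsequence_length = 0
--         for comb in subsequences:
--             subsequence_length += 1
--         number_of_combinations[at_a_time] = subsequence_length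
--     return number_of_combinations
-- ===== SOURCE B (Python) =====
-- def calculate_numbers_of_combinations_of(a_sequence):
--     """Return dict key= subsequence length, value= number of combinations)."""
--     n = len(a_sequence)
--     number_of_combinations = {}
--     comb = 1
--     for k in range(1, n + 1):
--         comb = comb * (n - k + 1) // k
--         number_of_combinations[k] = comb
--     return number_of_combinations
-- ===== Notes on version B (the rewrite author's own statement) =====
-- stated objective: faster
-- what changed: Replaces enumerating every itertools combination of each length with a single forward pass maintaining a running binomial coefficient C(n,k) = C(n,k-1)*(n-k+1)//k.
import Mathlib
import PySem

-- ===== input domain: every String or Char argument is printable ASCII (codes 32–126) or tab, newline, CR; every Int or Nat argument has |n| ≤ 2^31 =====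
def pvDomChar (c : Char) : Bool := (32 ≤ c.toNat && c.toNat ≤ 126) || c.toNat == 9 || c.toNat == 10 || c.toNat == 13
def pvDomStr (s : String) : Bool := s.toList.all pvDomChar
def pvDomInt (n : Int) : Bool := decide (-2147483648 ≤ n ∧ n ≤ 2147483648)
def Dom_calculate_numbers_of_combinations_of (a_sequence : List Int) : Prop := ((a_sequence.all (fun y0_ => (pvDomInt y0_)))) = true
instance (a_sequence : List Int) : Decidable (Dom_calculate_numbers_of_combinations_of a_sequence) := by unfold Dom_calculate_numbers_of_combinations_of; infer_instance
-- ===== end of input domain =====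

-- B replaces enumerating every itertools combination of each length with one pass
-- maintaining a running binomial coefficient (objective: faster).

-- ===== PORT A =====
-- itertools.combinations(xs, k), in itertools' order
def pvCombos (xs : List Int) (k : Nat) : List (List Int) :=
  match k, xs with
  | 0, _ => [[]]
  | _ + 1, [] => []
  | k + 1, x :: rest => (pvCombos rest k).map (fun c => x :: c) ++ pvCombos rest (k + 1)

def calculate_numbers_of_combinations_of (a_sequence : List Int) : List (Int × Int) :=
  ((PySem.List.enumerate a_sequence 1).foldl
    (fun (number_of_combinations : PySem.Dict Int Int) p =>
      let at_a_time := p.1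
      -- at_a_time ≥ 1 on this loop, so .toNat is exact
      let subsequences := pvCombos a_sequence at_a_time.toNat
      let subsequence_length : Int := subsequences.foldl (fun c _ => c + 1) 0
      number_of_combinations.insert at_a_time subsequence_length)
    PySem.Dict.empty).items

-- ===== PORT B =====
def calculate_numbers_of_combinations_of_alt (a_sequence : List Int) : List (Int × Int) :=
  let n : Int := a_sequence.length
  (((PySem.List.pyRange 1 (n + 1) 1).foldl
      (fun (st : Int × PySem.Dict Int Int) k =>
        let comb := PySem.Int.floordiv (st.1 * (n - k + 1)) k
        (comb, st.2.insert k comb))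
      (1, PySem.Dict.empty)).2).items

-- ===== PRECONDITION & SPEC =====
def Spec_calculate_numbers_of_combinations_of (a_sequence : List Int) (out : List (Int × Int)) : Prop := out = calculate_numbers_of_combinations_of_alt a_sequence
instance (a_sequence : List Int) (out : List (Int × Int)) : Decidable (Spec_calculate_numbers_of_combinations_of a_sequence out) := by unfold Spec_calculate_numbers_of_combinations_of; infer_instance

-- ===== CLAIM (what is proved, stated in full; the proofs are below) =====
def Claim_equal_calculate_numbers_of_combinations_of : Prop := ∀ (a_sequence : List Int), Dom_calculate_numbers_of_combinations_of a_sequence → Spec_calculate_numbers_of_combinations_of a_sequence (calculate_numbers_of_combinations_of a_sequence)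

-- ===== LEMMAS AND PROOFS =====
-- closed form both folds reach: [(k, C(n,k)) for k = 1..m]
def pvCF (n m : Nat) : List (Int × Int) :=
  (List.range m).map (fun i => (((i + 1 : Nat) : Int), ((Nat.choose n (i + 1) : Nat) : Int)))

theorem pvCount {α : Type} (l : List α) (c : Int) :
    l.foldl (fun c _ => c + 1) c = c + l.length := by
  induction l generalizing c with
  | nil => simp
  | cons x xs ih => simp [List.foldl_cons, ih]; omega

theorem pvCombos_length (xs : List Int) (k : Nat) :
    (pvCombos xs k).length = Nat.choose xs.length k := by
  induction xs generalizing k with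
  | nil => cases k <;> simp [pvCombos]
  | cons x rest ih =>
    cases k with
    | zero => simp [pvCombos]
    | succ k => simp [pvCombos, ih, Nat.choose_succ_succ]

theorem pvCF_succ (n m : Nat) :
    pvCF n (m + 1) = pvCF n m ++ [((m : Int) + 1, (Nat.choose n (m + 1) : Int))] := by
  simp [pvCF, List.range_succ]

theorem pvCF_not_mem_keys (n m : Nat) :
    ((m : Int) + 1) ∉ (pvCF n m).map (·.1) := by
  intro hmem
  simp only [pvCF, List.map_map, List.mem_map, List.mem_range, Function.comp_apply] at hmem
  obtain ⟨i, hi, h⟩ := hmem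
  omega

theorem pvInsert_fresh (d : PySem.Dict Int Int) (k v : Int)
    (h : k ∉ d.items.map (·.1)) :
    d.insert k v = PySem.Dict.mk (d.items ++ [(k, v)]) := by
  have hc : d.contains k = false := by
    rw [PySem.Dict.contains_eq_decide_mem_keys]
    simpa [PySem.Dict.keys] using h
  apply PySem.Dict.ext
  rw [PySem.Dict.items_insert_of_not_contains d v hc]

theorem pvA_inv (a : List Int) (m : Nat) (hm : m ≤ a.length) :
    (PySem.List.pyRange 1 ((m : Int) + 1) 1).foldl
      (fun (d : PySem.Dict Int Int) k =>
        d.insert k ((pvCombos a k.toNat).foldl (fun c _ => c + 1) (0 : Int)))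
      PySem.Dict.empty = PySem.Dict.mk (pvCF a.length m) := by
  induction m with
  | zero =>
    rw [PySem.List.pyRange_one_eq_nil (by omega)]
    simp only [List.foldl_nil]
    apply PySem.Dict.ext
    simp [pvCF, PySem.Dict.empty]
  | succ m ih =>
    rw [show ((m + 1 : Nat) : Int) + 1 = ((m : Int) + 1) + 1 by push_cast; ring,
        PySem.List.pyRange_one_succ_right (by omega), List.foldl_append,
        ih (by omega)]
    simp only [List.foldl_cons, List.foldl_nil]
    have htn : ((m : Int) + 1).toNat = m + 1 := by omega
    have hval : (pvCombos a ((m : Int) + 1).toNat).foldl (fun c _ => c + 1) (0 : Int)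
        = (Nat.choose a.length (m + 1) : Int) := by
      rw [pvCount, htn, pvCombos_length]; simp
    rw [hval, pvCF_succ]
    exact pvInsert_fresh _ _ _ (pvCF_not_mem_keys a.length m)

theorem pvB_inv (N : Nat) (m : Nat) (hm : m ≤ N) :
    (PySem.List.pyRange 1 ((m : Int) + 1) 1).foldl
      (fun (st : Int × PySem.Dict Int Int) k =>
        let comb := PySem.Int.floordiv (st.1 * ((N : Int) - k + 1)) k
        (comb, st.2.insert k comb))
      (1, PySem.Dict.empty)
    = ((Nat.choose N m : Int), PySem.Dict.mk (pvCF N m)) := by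
  induction m with
  | zero =>
    rw [PySem.List.pyRange_one_eq_nil (by omega)]
    simp only [List.foldl_nil]
    refine Prod.ext (by simp) ?_
    apply PySem.Dict.ext
    simp [pvCF, PySem.Dict.empty]
  | succ m ih =>
    rw [show ((m + 1 : Nat) : Int) + 1 = ((m : Int) + 1) + 1 by push_cast; ring,
        PySem.List.pyRange_one_succ_right (by omega), List.foldl_append,
        ih (by omega)]
    simp only [List.foldl_cons, List.foldl_nil]
    have hsub : (N : Int) - ((m : Int) + 1) + 1 = ((N - m : Nat) : Int) := by omega
    have hrec : (Nat.choose N m : Int) * ((N - m : Nat) : Int)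
        = (Nat.choose N (m + 1) : Int) * ((m : Int) + 1) := by
      rw [← Nat.cast_mul, ← Nat.choose_succ_right_eq]
      push_cast
      ring
    have hdiv : PySem.Int.floordiv ((Nat.choose N m : Int) * ((N : Int) - ((m : Int) + 1) + 1)) ((m : Int) + 1)
        = (Nat.choose N (m + 1) : Int) := by
      rw [hsub, hrec, PySem.Int.floordiv_eq_ediv_of_pos (by positivity),
          Int.mul_ediv_cancel _ (by omega)]
    simp only [hdiv]
    refine Prod.ext rfl ?_
    show (PySem.Dict.mk (pvCF N m)).insert ((m : Int) + 1) ((Nat.choose N (m + 1) : Nat) : Int)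
        = PySem.Dict.mk (pvCF N (m + 1))
    rw [pvCF_succ]
    exact pvInsert_fresh _ _ _ (pvCF_not_mem_keys N m)

theorem pvA_closed (a : List Int) :
    calculate_numbers_of_combinations_of a = pvCF a.length a.length := by
  have h1 : ((PySem.List.enumerate a 1).map (·.1)).foldl
      (fun (d : PySem.Dict Int Int) k =>
        d.insert k ((pvCombos a k.toNat).foldl (fun c _ => c + 1) (0 : Int)))
      PySem.Dict.empty = PySem.Dict.mk (pvCF a.length a.length) := by
    rw [PySem.List.map_fst_enumerate,
        show (1 : Int) + a.length = (a.length : Int) + 1 by ring]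
    exact pvA_inv a a.length le_rfl
  exact congrArg PySem.Dict.items (List.foldl_map.symm.trans h1)

theorem pvB_closed (a : List Int) :
    calculate_numbers_of_combinations_of_alt a = pvCF a.length a.length := by
  exact congrArg (fun p => p.2.items) (pvB_inv a.length a.length le_rfl)

-- ===== VERDICT (by name: the statement is the Claim_ definition above) =====
theorem calculate_numbers_of_combinations_of_spec : Claim_equal_calculate_numbers_of_combinations_of := by
  intro a _
  unfold Spec_calculate_numbers_of_combinations_of
  rw [pvA_closed, pvB_closed]
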